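-- pv_equiv track=rewrite | github.com/Arsen1302/Code-copy-detector | TestData/solutions/problem_1202_4.py | solution_1202_4
-- ===== SOURCE A (Python) =====
-- from typing import List
--
-- def solution_1202_4(boxes: str) -> List[int]:
--     arr = []
--     for i in range(len(boxes)):
--         sumi = 0
--         for j in range(len(boxes)):
--             if(boxes[j] == '1'):
--                 sumi += abs(j - i)
--         arr.append(sumi)
--
--     return arr
-- ===== SOURCE B (Python) =====
-- from typing import List
--
-- def solution_1202_4(boxes: str) -> List[int]:
--     def pass_(s):
--         out = []
--         c = t = 0
--         for ch in s:
--             out.append(t)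
--             if ch == '1':
--                 c += 1
--             t += c
--         return out
--     left = pass_(boxes)
--     right = pass_(boxes[::-1])[::-1]
--     return [l + r for l, r in zip(left, right)]
-- ===== Notes on version B (the rewrite author's own statement) =====
-- stated objective: faster
-- what changed: Replaced the quadratic all-pairs distance scan with two linear prefix/suffix passes that carry a running count of '1's and a running distance total, combined elementwise.
import Mathlib
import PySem

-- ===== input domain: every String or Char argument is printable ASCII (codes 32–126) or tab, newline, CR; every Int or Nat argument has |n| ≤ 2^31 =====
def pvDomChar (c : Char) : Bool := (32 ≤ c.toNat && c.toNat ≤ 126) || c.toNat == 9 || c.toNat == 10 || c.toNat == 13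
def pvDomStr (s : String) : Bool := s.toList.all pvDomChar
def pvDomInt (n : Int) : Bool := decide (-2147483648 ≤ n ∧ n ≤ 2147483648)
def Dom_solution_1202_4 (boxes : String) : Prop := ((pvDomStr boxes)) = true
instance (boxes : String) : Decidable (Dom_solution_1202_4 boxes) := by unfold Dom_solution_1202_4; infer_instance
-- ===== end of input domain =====

-- B replaces A's quadratic all-pairs distance scan by two linear passes (a prefix and a
-- suffix sweep carrying a count of '1's and a running distance total), combined elementwise.

-- ===== PORT A =====
def solution_1202_4 (boxes : String) : List Int :=
  let cs := boxes.toList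
  let n : Int := PySem.Str.len boxes
  (PySem.List.pyRange 0 n 1).foldl (fun arr i =>
    arr ++ [ (PySem.List.pyRange 0 n 1).foldl (fun sumi j =>
        if PySem.List.pyGetD cs j ' ' = '1' then sumi + |j - i| else sumi) 0 ]) []

-- ===== PORT B =====
-- one sweep of Source B's pass_: emits the running total t, then updates count c and total t
def pvPass : List Char → Int → Int → List Int
  | [], _, _ => []
  | ch :: rest, c, t =>
    let c' := if ch = '1' then c + 1 else c
    t :: pvPass rest c' (t + c')

def solution_1202_4_alt (boxes : String) : List Int :=
  let cs := boxes.toList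
  let left := pvPass cs 0 0
  let right := (pvPass cs.reverse 0 0).reverse
  List.zipWith (· + ·) left right

-- ===== PRECONDITION & SPEC =====
def Spec_solution_1202_4 (boxes : String) (out : List Int) : Prop := out = solution_1202_4_alt boxes
instance (boxes : String) (out : List Int) : Decidable (Spec_solution_1202_4 boxes out) := by unfold Spec_solution_1202_4; infer_instance

-- ===== CLAIM (what is proved, stated in full; the proofs are below) =====
def Claim_equal_solution_1202_4 : Prop := ∀ (boxes : String), Dom_solution_1202_4 boxes → Spec_solution_1202_4 boxes (solution_1202_4 boxes)

-- ===== LEMMAS AND PROOFS =====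

def pvInd (l : List Char) (j : Nat) : Int := if l.getD j ' ' = '1' then 1 else 0

def pvF : List Char → Int → Int
  | [], _ => 0
  | ch :: rest, i => (if ch = '1' then |i| else 0) + pvF rest (i - 1)

def pvW : List Char → Nat → Int
  | _, 0 => 0
  | [], _ + 1 => 0
  | ch :: rest, k + 1 => (if ch = '1' then (k : Int) + 1 else 0) + pvW rest k

theorem pvF_sum (l : List Char) (i : Int) :
    pvF l i = ∑ j ∈ Finset.range l.length, pvInd l j * |(j : Int) - i| := by
  induction l generalizing i with
  | nil => simp [pvF]
  | cons ch rest ih =>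
    rw [pvF, ih (i - 1), List.length_cons, Finset.sum_range_succ']
    have h0 : pvInd (ch :: rest) 0 * |((0 : Nat) : Int) - i| = (if ch = '1' then |i| else 0) := by
      simp only [pvInd, List.getD_cons_zero, Nat.cast_zero, zero_sub, abs_neg]
      split_ifs <;> ring
    have hs : (∑ j ∈ Finset.range rest.length,
          pvInd (ch :: rest) (j + 1) * |((j + 1 : Nat) : Int) - i|)
        = ∑ j ∈ Finset.range rest.length, pvInd rest j * |(j : Int) - (i - 1)| := by
      refine Finset.sum_congr rfl fun j _ => ?_
      simp only [pvInd, List.getD_cons_succ]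
      congr 1
      push_cast
      congr 1
      ring
    rw [hs, h0]
    ring

theorem pvW_sum (l : List Char) (k : Nat) (hk : k ≤ l.length) :
    pvW l k = ∑ j ∈ Finset.range k, pvInd l j * ((k : Int) - j) := by
  induction l generalizing k with
  | nil =>
    cases k with
    | zero => simp [pvW]
    | succ k => simp at hk
  | cons ch rest ih =>
    cases k with
    | zero => simp [pvW]
    | succ k =>
      rw [pvW, ih k (by simpa using hk), Finset.sum_range_succ']
      have h0 : pvInd (ch :: rest) 0 * (((k + 1 : Nat) : Int) - ((0 : Nat) : Int))
          = (if ch = '1' then (k : Int) + 1 else 0) := by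
        simp only [pvInd, List.getD_cons_zero]
        split_ifs <;> push_cast <;> ring
      have hs : (∑ j ∈ Finset.range k,
            pvInd (ch :: rest) (j + 1) * (((k + 1 : Nat) : Int) - ((j + 1 : Nat) : Int)))
          = ∑ j ∈ Finset.range k, pvInd rest j * ((k : Int) - j) := by
        refine Finset.sum_congr rfl fun j _ => ?_
        simp only [pvInd, List.getD_cons_succ]
        push_cast
        ring
      rw [hs, h0]
      ring

theorem pvPass_length (l : List Char) (c t : Int) : (pvPass l c t).length = l.length := by
  induction l generalizing c t with
  | nil => simp [pvPass]
  | cons ch rest ih => simp [pvPass, ih]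

theorem pvPass_getElem (l : List Char) (c t : Int) (k : Nat) (hk : k < l.length) :
    (pvPass l c t)[k]'(by rw [pvPass_length]; exact hk) = t + c * k + pvW l k := by
  induction l generalizing c t k with
  | nil => simp at hk
  | cons ch rest ih =>
    cases k with
    | zero => simp [pvPass, pvW]
    | succ k =>
      have hk' : k < rest.length := by simpa using hk
      have := ih (if ch = '1' then c + 1 else c)
        (t + (if ch = '1' then c + 1 else c)) k hk'
      simp only [pvPass]
      rw [List.getElem_cons_succ, this, pvW]
      split_ifs <;> push_cast <;> ring

theorem pvGetD_reverse (l : List Char) (j : Nat) (hj : j < l.length) :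
    l.reverse.getD j ' ' = l.getD (l.length - 1 - j) ' ' := by
  rw [List.getD_eq_getElem _ _ (by simpa using hj),
      List.getD_eq_getElem _ _ (by omega)]
  rw [List.getElem_reverse]

theorem pvInnerA (l pre : List Char) (i s : Int) :
    (PySem.List.pyRange (pre.length) ((pre.length : Int) + l.length) 1).foldl
      (fun sumi j => if PySem.List.pyGetD (pre ++ l) j ' ' = '1' then sumi + |j - i| else sumi) s
    = s + pvF l (i - pre.length) := by
  induction l generalizing pre s with
  | nil => simp [PySem.List.pyRange_one_eq_nil, pvF]
  | cons ch rest ih =>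
    rw [PySem.List.pyRange_one_cons (by simp)]
    rw [List.foldl_cons]
    have hget : PySem.List.pyGetD (pre ++ ch :: rest) (pre.length) ' ' = ch := by
      rw [PySem.List.pyGetD_natCast]
      simp
    rw [hget]
    have hlen : ((pre.length : Int) + 1) = ((pre ++ [ch]).length : Int) := by
      simp
    have happ : pre ++ ch :: rest = (pre ++ [ch]) ++ rest := by simp
    have hend : (pre.length : Int) + ((ch :: rest).length : Int)
        = ((pre ++ [ch]).length : Int) + (rest.length : Int) := by
      simp [List.length_cons]; ring
    rw [hend, hlen, happ, ih (pre ++ [ch])]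
    have hsub : i - ((pre ++ [ch]).length : Int) = (i - pre.length) - 1 := by
      simp [List.length_append]; ring
    rw [hsub, pvF]
    have habs : |(pre.length : Int) - i| = |i - (pre.length : Int)| := abs_sub_comm _ _
    split_ifs <;> [rw [habs]; skip] <;> ring

theorem pvA_eq (boxes : String) :
    solution_1202_4 boxes = (PySem.List.pyRange 0 (boxes.toList.length : Int) 1).map
      (fun i => pvF boxes.toList i) := by
  show (PySem.List.pyRange 0 (PySem.Str.len boxes) 1).foldl _ [] = _
  rw [PySem.List.foldl_append_singleton_eq_map]
  have hlen : (PySem.Str.len boxes) = (boxes.toList.length : Int) := by simp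
  rw [hlen]
  refine List.map_congr_left (fun i hi => ?_)
  have := pvInnerA boxes.toList [] i 0
  simpa using this

theorem pvKey (l : List Char) (k m : Nat) (hk : l.length = k + 1 + m) :
    pvF l (k : Int) = pvW l k + pvW l.reverse m := by
  rw [pvF_sum, pvW_sum l k (by omega), pvW_sum l.reverse m (by simp; omega)]
  have hrev : ∑ j ∈ Finset.range m, pvInd l.reverse j * ((m : Int) - j)
      = ∑ j ∈ Finset.range m, pvInd l (k + 1 + j) * ((j : Int) + 1) := by
    rw [← Finset.sum_range_reflect]
    refine Finset.sum_congr rfl (fun j hj => ?_)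
    rw [Finset.mem_range] at hj
    have h1 : pvInd l.reverse (m - 1 - j) = pvInd l (k + 1 + j) := by
      unfold pvInd
      rw [pvGetD_reverse l (m - 1 - j) (by omega)]
      have h2 : l.length - 1 - (m - 1 - j) = k + 1 + j := by omega
      rw [h2]
    rw [h1]
    congr 1
    omega
  rw [hrev, show l.length = (k + 1) + m from hk, Finset.sum_range_add]
  congr 1
  · rw [Finset.sum_range_succ]
    have hz : pvInd l k * |(k : Int) - k| = 0 := by simp
    rw [hz, add_zero]
    refine Finset.sum_congr rfl (fun j hj => ?_)
    rw [Finset.mem_range] at hj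
    congr 1
    rw [abs_sub_comm, abs_of_nonneg (by omega)]
  · refine Finset.sum_congr rfl (fun j hj => ?_)
    congr 1
    rw [abs_of_nonneg (by push_cast; omega)]
    omega

theorem pvB_length (boxes : String) :
    (solution_1202_4_alt boxes).length = boxes.toList.length := by
  show (List.zipWith (· + ·) (pvPass boxes.toList 0 0)
    ((pvPass boxes.toList.reverse 0 0).reverse)).length = _
  simp [pvPass_length]

theorem pvB_getElem (boxes : String) (k : Nat) (hk : k < boxes.toList.length) (h : _) :
    (solution_1202_4_alt boxes)[k]'h
      = pvW boxes.toList k + pvW boxes.toList.reverse (boxes.toList.length - 1 - k) := by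
  have hlenr : (pvPass boxes.toList.reverse 0 0).length = boxes.toList.length := by
    rw [pvPass_length]; simp
  show (List.zipWith (· + ·) (pvPass boxes.toList 0 0)
    ((pvPass boxes.toList.reverse 0 0).reverse))[k]'h = _
  rw [List.getElem_zipWith, pvPass_getElem boxes.toList 0 0 k hk, List.getElem_reverse]
  simp only [hlenr]
  rw [pvPass_getElem boxes.toList.reverse 0 0 (boxes.toList.length - 1 - k)
    (by rw [List.length_reverse]; omega)]
  ring

-- ===== VERDICT (by name: the statement is the Claim_ definition above) =====
theorem solution_1202_4_spec : Claim_equal_solution_1202_4 := by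
  intro boxes _
  unfold Spec_solution_1202_4
  rw [pvA_eq]
  refine List.ext_getElem ?_ ?_
  · rw [pvB_length]; simp [PySem.List.length_pyRange_one]
  · intro k h1 h2
    have hk : k < boxes.toList.length := by
      have := h1; rwa [List.length_map, PySem.List.length_pyRange_one] at this
      -- adjust
    rw [List.getElem_map, PySem.List.getElem_pyRange_one]
    have h0 : (0 : Int) + (k : Int) = (k : Int) := by ring
    rw [h0]
    rw [pvB_getElem boxes k hk h2]
    exact pvKey boxes.toList k (boxes.toList.length - 1 - k) (by omega)
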